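-- pv_equiv track=rewrite | github.com/aidansmyth95/AlgoExpertSolutions | Greedy Algorithms/Valid Starting City/Soluion1.py | validStartingCity
-- ===== SOURCE A (Python) =====
-- def validStartingCity(distances, fuel, mpg):
-- 	numberOfCities = len(distances)
--
-- 	for startCity in range(numberOfCities):
-- 		milesRemaining = 0
-- 		for currentCity in range(startCity, startCity + numberOfCities):
-- 			if milesRemaining < 0:
-- 				continue
--
-- 			currentCity = currentCity % numberOfCities
-- 			fuelFromCurrentCity = fuel[currentCity]
-- 			distanceToNextCity = distances[currentCity]
-- 			milesRemaining += fuelFromCurrentCity * mpg - distanceToNextCity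
--
-- 		# if after looping through all cities we have made it
-- 		if milesRemaining >= 0:
-- 			return startCity
-- 	return -1
-- ===== SOURCE B (Python) =====
-- def validStartingCity(distances, fuel, mpg):
--     deltas = [f * mpg - d for d, f in zip(distances, fuel)]
--     if not deltas or sum(deltas) < 0:
--         return -1
--     start = 0
--     tank = 0
--     for i, delta in enumerate(deltas):
--         tank += delta
--         if tank < 0:
--             start = i + 1
--             tank = 0
--     return start
-- ===== Notes on version B (the rewrite author's own statement) =====
-- stated objective: faster
-- what changed: Replaces A's try-every-start O(n^2) full-cycle simulation by the single-pass gas-station greedy: compute per-city net gains once, return -1 if their total is negative, otherwise one linear scan that resets the candidate start whenever the running tank goes negative.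
import Mathlib
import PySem

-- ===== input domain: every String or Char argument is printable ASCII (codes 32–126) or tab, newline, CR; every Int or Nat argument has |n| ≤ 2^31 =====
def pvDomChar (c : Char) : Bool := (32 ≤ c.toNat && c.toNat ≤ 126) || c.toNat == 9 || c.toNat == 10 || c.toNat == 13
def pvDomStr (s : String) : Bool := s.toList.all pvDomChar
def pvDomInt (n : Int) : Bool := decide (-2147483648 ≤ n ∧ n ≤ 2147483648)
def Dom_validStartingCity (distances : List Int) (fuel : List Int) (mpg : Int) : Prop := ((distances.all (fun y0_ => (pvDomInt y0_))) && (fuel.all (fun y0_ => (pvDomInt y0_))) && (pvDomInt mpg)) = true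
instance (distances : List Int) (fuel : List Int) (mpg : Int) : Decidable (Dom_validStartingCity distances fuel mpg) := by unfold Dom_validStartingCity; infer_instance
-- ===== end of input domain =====

-- B replaces A's quadratic try-every-start simulation by a single linear pass (gas-station
-- greedy: reset the candidate start whenever the running tank goes negative); exact same
-- return value on all inputs where A returns normally (Pre_: fuel covers every city index).

-- ===== PORT A =====
-- inner 'for currentCity in range(startCity, startCity + numberOfCities)' loop of A
def pvA_inner (distances fuel : List Int) (mpg n startCity : Int) : Int :=
  (PySem.List.pyRange startCity (startCity + n) 1).foldl
    (fun milesRemaining currentCity =>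
      if milesRemaining < 0 then milesRemaining
      else
        let currentCity' := PySem.Int.mod currentCity n
        let fuelFromCurrentCity := PySem.List.pyGetD fuel currentCity' 0
        let distanceToNextCity := PySem.List.pyGetD distances currentCity' 0
        milesRemaining + fuelFromCurrentCity * mpg - distanceToNextCity) 0

-- outer 'for startCity in range(numberOfCities)' loop with its early return
def pvA_loop (distances fuel : List Int) (mpg n : Int) : List Int → Int
  | [] => -1
  | startCity :: rest =>
    if pvA_inner distances fuel mpg n startCity ≥ 0 then startCity
    else pvA_loop distances fuel mpg n rest

def validStartingCity (distances : List Int) (fuel : List Int) (mpg : Int) : Int :=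
  let numberOfCities : Int := distances.length
  pvA_loop distances fuel mpg numberOfCities (PySem.List.pyRange 0 numberOfCities 1)

-- ===== PORT B =====
def validStartingCity_alt (distances : List Int) (fuel : List Int) (mpg : Int) : Int :=
  let deltas := List.zipWith (fun d f => f * mpg - d) distances fuel
  if deltas = [] ∨ deltas.sum < 0 then -1
  else
    ((PySem.List.enumerate deltas 0).foldl
      (fun (st : Int × Int) (p : Int × Int) =>
        let tank := st.2 + p.2
        if tank < 0 then (p.1 + 1, 0) else (st.1, tank)) (0, 0)).1

-- ===== PRECONDITION & SPEC =====
-- Pre_ excludes only inputs where A raises IndexError: whenever fuel is shorter than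
-- distances (and distances is nonempty) A inevitably reads fuel[len(fuel)] and raises.
def Pre_validStartingCity (distances : List Int) (fuel : List Int) (mpg : Int) : Prop :=
  distances.length ≤ fuel.length
instance (distances : List Int) (fuel : List Int) (mpg : Int) : Decidable (Pre_validStartingCity distances fuel mpg) := by unfold Pre_validStartingCity; infer_instance

def pvWitness_validStartingCity : List Int × List Int × Int := ([5, 25, 15, 10, 15], [1, 2, 1, 0, 3], 10)

def Spec_validStartingCity (distances : List Int) (fuel : List Int) (mpg : Int) (out : Int) : Prop := out = validStartingCity_alt distances fuel mpg
instance (distances : List Int) (fuel : List Int) (mpg : Int) (out : Int) : Decidable (Spec_validStartingCity distances fuel mpg out) := by unfold Spec_validStartingCity; infer_instance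

-- ===== CLAIM (what is proved, stated in full; the proofs are below) =====
def Claim_equal_validStartingCity : Prop := ∀ (distances : List Int) (fuel : List Int) (mpg : Int), Dom_validStartingCity distances fuel mpg → Pre_validStartingCity distances fuel mpg → Spec_validStartingCity distances fuel mpg (validStartingCity distances fuel mpg)

-- ===== LEMMAS AND PROOFS =====

-- prefix sums of the per-city net-gain list D
def pvP (D : List Int) (m : Nat) : Int := (D.take m).sum

-- 'start s is valid': every cyclic partial sum starting at s is nonnegative,
-- phrased via prefix sums of D
def pvValid (D : List Int) (s : Nat) : Prop :=
  (∀ m : Nat, s < m → m ≤ D.length → pvP D s ≤ pvP D m) ∧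
  (∀ j : Nat, 1 ≤ j → j ≤ s → 0 ≤ D.sum - pvP D s + pvP D j)

-- the 'stop accumulating once negative' fold of A's inner loop
def pvF : Int → Int → Int := fun m x => if m < 0 then m else m + x

theorem pvF_stay_neg (l : List Int) (m : Int) (hm : m < 0) : l.foldl pvF m = m := by
  induction l with
  | nil => rfl
  | cons x t ih => simpa [pvF, if_pos hm] using ih

theorem pvF_spec (l : List Int) : ∀ m : Int, 0 ≤ m →
    (0 ≤ l.foldl pvF m ↔ ∀ k : Nat, 1 ≤ k → k ≤ l.length → 0 ≤ m + (l.take k).sum) := by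
  induction l with
  | nil =>
    intro m hm
    simp only [List.foldl_nil, List.length_nil]
    exact ⟨fun _ k h1 h2 => by omega, fun _ => hm⟩
  | cons x t ih =>
    intro m hm
    by_cases hx : m + x < 0
    · rw [List.foldl_cons]
      have : pvF m x = m + x := by simp [pvF, not_lt.mpr hm]
      rw [this, pvF_stay_neg t _ hx]
      constructor
      · intro h; omega
      · intro h
        have := h 1 (by omega) (by simp)
        simp at this; omega
    · rw [List.foldl_cons]
      have h1 : pvF m x = m + x := by simp [pvF, not_lt.mpr hm]
      rw [h1, ih (m + x) (by omega)]
      constructor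
      · intro h k hk1 hk2
        match k with
        | 1 => simpa using hx
        | (j+2) =>
          have := h (j+1) (by omega) (by simpa using hk2)
          simp only [List.take_succ_cons, List.sum_cons] at *
          omega
      · intro h k hk1 hk2
        have := h (k+1) (by omega) (by simpa using hk2)
        simp only [List.take_succ_cons, List.sum_cons] at this
        omega

-- pyRange a (a+k) mapped through g, as a map over List.range k
theorem pvRange_map (g : Int → Int) : ∀ (k : Nat) (a : Int),
    (PySem.List.pyRange a (a + k) 1).map g = (List.range k).map (fun j : Nat => g (a + (j : Int))) := by
  intro k
  induction k with
  | zero => intro a; simp [PySem.List.pyRange_one_eq_nil]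
  | succ k ih =>
    intro a
    rw [PySem.List.pyRange_one_cons (by omega), List.range_succ_eq_map]
    have : a + (↑(k+1) : Int) = (a + 1) + ↑k := by push_cast; ring
    rw [List.map_cons, this, ih (a+1), List.map_cons, List.map_map]
    refine congrArg₂ _ (by norm_num) ?_
    apply List.map_congr_left
    intro j _
    simp only [Function.comp_apply, Nat.succ_eq_add_one]
    congr 1
    push_cast; ring

-- the list of deltas A visits from start s equals the rotation D.drop s ++ D.take s
theorem pvCycEq (distances fuel : List Int) (mpg : Int) (s : Nat)
    (hpre : distances.length ≤ fuel.length) (hs : s ≤ distances.length) :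
    (List.range distances.length).map
      (fun j : Nat => PySem.List.pyGetD fuel (PySem.Int.mod ((s : Int) + j) distances.length) 0 * mpg
        - PySem.List.pyGetD distances (PySem.Int.mod ((s : Int) + j) distances.length) 0)
    = (List.zipWith (fun d f => f * mpg - d) distances fuel).drop s
      ++ (List.zipWith (fun d f => f * mpg - d) distances fuel).take s := by
  set n := distances.length with hn
  set D := List.zipWith (fun d f => f * mpg - d) distances fuel with hD
  have hDlen : D.length = n := by simp [hD, hn]; omega
  apply List.ext_getElem
  · simp [hDlen]; omega
  intro k h1 h2
  simp only [List.getElem_map, List.getElem_range]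
  have hkn : k < n := by simpa using h1
  by_cases hk : s + k < n
  · have hmod : PySem.Int.mod ((s : Int) + k) n = ((s + k : Nat) : Int) := by
      have : ((s : Int) + k) = ((s + k : Nat) : Int) := by push_cast; ring
      rw [this, PySem.Int.mod_natCast, Nat.mod_eq_of_lt hk]
    rw [hmod, PySem.List.pyGetD_natCast, PySem.List.pyGetD_natCast]
    rw [List.getElem_append_left (by simp [hDlen]; omega)]
    rw [List.getElem_drop]
    have hsk : s + k < D.length := by omega
    rw [show D[s + k]'(by omega) = fuel[s+k]'(by simp [hD] at hsk; omega) * mpg - distances[s+k]'(by simp [hD] at hsk; omega) from List.getElem_zipWith]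
    rw [List.getD_eq_getElem fuel 0 (by simp [hD] at hsk; omega),
        List.getD_eq_getElem distances 0 (by simp [hD] at hsk; omega)]
  · have hge : n ≤ s + k := by omega
    have hmod : PySem.Int.mod ((s : Int) + k) n = ((s + k - n : Nat) : Int) := by
      have : ((s : Int) + k) = ((s + k : Nat) : Int) := by push_cast; ring
      rw [this, PySem.Int.mod_natCast, Nat.mod_eq_sub_mod hge, Nat.mod_eq_of_lt (by omega)]
    rw [hmod, PySem.List.pyGetD_natCast, PySem.List.pyGetD_natCast]
    rw [List.getElem_append_right (by simp [hDlen]; omega)]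
    have hidx : s + k - n < D.length := by omega
    rw [List.getElem_take]
    rw [getElem_congr rfl (show (k - (D.drop s).length) = s + k - n by simp [hDlen]; omega) (by omega)]
    rw [show D[s + k - n]'(by omega) = fuel[s+k-n]'(by simp [hD] at hidx; omega) * mpg - distances[s+k-n]'(by simp [hD] at hidx; omega) from List.getElem_zipWith]
    rw [List.getD_eq_getElem fuel 0 (by simp [hD] at hidx; omega),
        List.getD_eq_getElem distances 0 (by simp [hD] at hidx; omega)]

-- prefix sums of the rotation D.drop s ++ D.take s, in terms of prefix sums of D
theorem pvRotSum (D : List Int) (s k : Nat) (hs : s ≤ D.length) (hk : k ≤ D.length) :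
    ((D.drop s ++ D.take s).take k).sum =
      if k ≤ D.length - s then pvP D (s + k) - pvP D s
      else (D.sum - pvP D s) + pvP D (k - (D.length - s)) := by
  have hdrop : (D.drop s).sum = D.sum - pvP D s := by
    have := congrArg List.sum (List.take_append_drop s D)
    simp only [List.sum_append] at this
    unfold pvP; omega
  split_ifs with h
  · rw [List.take_append_of_le_length (by simp; omega)]
    have h2 : D.take (s + k) = D.take s ++ (D.drop s).take k := List.take_add
    have := congrArg List.sum h2
    simp only [List.sum_append] at this
    unfold pvP at *; omega
  · rw [List.take_append, List.take_of_length_le (by simp; omega)]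
    rw [show k - (D.drop s).length = k - (D.length - s) by simp]
    rw [List.take_take, List.sum_append]
    rw [min_eq_left (by omega)]
    unfold pvP at *; omega

-- A's inner loop value is ≥ 0 iff s is a valid start
theorem pvInner_iff (distances fuel : List Int) (mpg : Int) (s : Nat)
    (hpre : distances.length ≤ fuel.length) (hs : s < distances.length) :
    (0 ≤ pvA_inner distances fuel mpg distances.length s ↔
      pvValid (List.zipWith (fun d f => f * mpg - d) distances fuel) s) := by
  set n := distances.length with hn
  set D := List.zipWith (fun d f => f * mpg - d) distances fuel with hD
  have hDlen : D.length = n := by simp [hD, hn]; omega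
  -- rewrite A's inner fold body as pvF applied to the visited delta
  have hbody : pvA_inner distances fuel mpg n s =
      ((PySem.List.pyRange (s : Int) ((s : Int) + (n : Int)) 1).map
        (fun c => PySem.List.pyGetD fuel (PySem.Int.mod c n) 0 * mpg
          - PySem.List.pyGetD distances (PySem.Int.mod c n) 0)).foldl pvF 0 := by
    rw [pvA_inner, List.foldl_map]
    apply PySem.List.foldl_congr_mem
    intro acc x _
    simp only [pvF]
    split <;> ring
  rw [hbody, pvRange_map]
  rw [pvCycEq distances fuel mpg s hpre (by omega)]
  simp only [← hD]
  rw [pvF_spec _ 0 le_rfl]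
  have hlen : (D.drop s ++ D.take s).length = n := by simp [hDlen]; omega
  simp only [hlen]
  constructor
  · intro h
    constructor
    · intro m hm1 hm2
      have := h (m - s) (by omega) (by omega)
      rw [pvRotSum D s (m - s) (by omega) (by omega)] at this
      rw [if_pos (by omega)] at this
      rw [show s + (m - s) = m by omega] at this
      omega
    · intro j hj1 hj2
      have := h ((n - s) + j) (by omega) (by omega)
      rw [pvRotSum D s ((n - s) + j) (by omega) (by omega)] at this
      rw [if_neg (by omega)] at this
      rw [show (n - s) + j - (D.length - s) = j by omega] at this
      omega
  · rintro ⟨hA, hB⟩ k hk1 hk2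
    rw [pvRotSum D s k (by omega) (by omega)]
    split_ifs with h
    · have := hA (s + k) (by omega) (by omega); omega
    · have := hB (k - (D.length - s)) (by omega) (by omega); omega

-- outer-loop lemmas: A returns -1 when no start works, and the first working start otherwise
theorem pvLoop_none (distances fuel : List Int) (mpg n : Int) : ∀ (k : Nat) (a b : Int),
    (b - a).toNat = k →
    (∀ x : Int, a ≤ x → x < b → ¬ (pvA_inner distances fuel mpg n x ≥ 0)) →
    pvA_loop distances fuel mpg n (PySem.List.pyRange a b 1) = -1 := by
  intro k
  induction k with
  | zero =>
    intro a b hk _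
    rw [PySem.List.pyRange_one_eq_nil (by omega)]
    rfl
  | succ k ih =>
    intro a b hk hno
    rw [PySem.List.pyRange_one_cons (by omega)]
    rw [pvA_loop, if_neg (hno a (by omega) (by omega))]
    exact ih (a+1) b (by omega) (fun x h1 h2 => hno x (by omega) h2)

theorem pvLoop_first (distances fuel : List Int) (mpg n : Int) : ∀ (k : Nat) (a b t : Int),
    (t - a).toNat = k → a ≤ t → t < b →
    pvA_inner distances fuel mpg n t ≥ 0 →
    (∀ x : Int, a ≤ x → x < t → ¬ (pvA_inner distances fuel mpg n x ≥ 0)) →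
    pvA_loop distances fuel mpg n (PySem.List.pyRange a b 1) = t := by
  intro k
  induction k with
  | zero =>
    intro a b t hk h1 h2 hyes _
    have : a = t := by omega
    subst this
    rw [PySem.List.pyRange_one_cons (by omega)]
    rw [pvA_loop, if_pos hyes]
  | succ k ih =>
    intro a b t hk h1 h2 hyes hno
    rw [PySem.List.pyRange_one_cons (by omega)]
    rw [pvA_loop, if_neg (hno a (by omega) (by omega))]
    exact ih (a+1) b t (by omega) (by omega) h2 hyes (fun x hx1 hx2 => hno x (by omega) hx2)

-- B's greedy loop: invariant-carrying characterisation
theorem pvGas (l : List Int) : ∀ (pre : List Int) (s : Nat) (tank : Int),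
    s ≤ pre.length →
    tank = pvP (pre ++ l) pre.length - pvP (pre ++ l) s →
    (∀ m : Nat, m ≤ pre.length → pvP (pre ++ l) s ≤ pvP (pre ++ l) m) →
    (∀ s' : Nat, s' < s → ∃ m : Nat, s' < m ∧ m ≤ pre.length ∧ pvP (pre ++ l) m < pvP (pre ++ l) s') →
    ∃ s2 : Nat,
      ((PySem.List.enumerate l (pre.length : Int)).foldl
        (fun (st : Int × Int) (p : Int × Int) =>
          let tank := st.2 + p.2
          if tank < 0 then (p.1 + 1, 0) else (st.1, tank)) ((s : Int), tank)).1 = (s2 : Int) ∧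
      s2 ≤ (pre ++ l).length ∧
      (∀ m : Nat, m ≤ (pre ++ l).length → pvP (pre ++ l) s2 ≤ pvP (pre ++ l) m) ∧
      (∀ s' : Nat, s' < s2 → ∃ m : Nat, s' < m ∧ m ≤ (pre ++ l).length ∧ pvP (pre ++ l) m < pvP (pre ++ l) s') := by
  induction l with
  | nil =>
    intro pre s tank hs htank hmin hfail
    exact ⟨s, by simp [PySem.List.enumerate], by simpa using hs, by simpa using hmin, by simpa using hfail⟩
  | cons d l' ih =>
    intro pre s tank hs htank hmin hfail
    have hassoc : pre ++ d :: l' = (pre ++ [d]) ++ l' := by simp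
    have hPi : pvP (pre ++ d :: l') pre.length = pre.sum := by
      unfold pvP; rw [List.take_left]
    have hPi1 : pvP (pre ++ d :: l') (pre.length + 1) = pre.sum + d := by
      unfold pvP
      rw [hassoc, show pre.length + 1 = (pre ++ [d]).length by simp, List.take_left]
      simp
    have hPs : pvP (pre ++ d :: l') s = pre.sum - tank := by
      have := hPi; omega
    have hlen1 : (pre ++ [d]).length = pre.length + 1 := by simp
    rw [PySem.List.enumerate_cons, List.foldl_cons]
    by_cases hneg : tank + d < 0
    · -- reset: new start index pre.length + 1, empty tank
      simp only [if_pos hneg]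
      obtain ⟨s2, hres, h1, h2, h3⟩ := ih (pre ++ [d]) (pre.length + 1) 0
        (by omega)
        (by rw [← hassoc, hlen1]; omega)
        (by
          rw [← hassoc, hlen1]
          intro m hm
          by_cases hmi : m = pre.length + 1
          · subst hmi; omega
          · have := hmin m (by omega)
            omega)
        (by
          rw [← hassoc, hlen1]
          intro s' hs'
          by_cases hs'' : s' < s
          · obtain ⟨m, hm1, hm2, hm3⟩ := hfail s' hs''
            exact ⟨m, hm1, by omega, hm3⟩
          · refine ⟨pre.length + 1, by omega, by omega, ?_⟩
            have := hmin s' (by omega)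
            omega)
      rw [← hassoc] at h1 h2 h3
      refine ⟨s2, ?_, h1, h2, h3⟩
      simpa [hlen1] using hres
    · -- no reset: keep start, tank grows by d
      simp only [if_neg hneg]
      obtain ⟨s2, hres, h1, h2, h3⟩ := ih (pre ++ [d]) s (tank + d)
        (by omega)
        (by rw [← hassoc, hlen1]; omega)
        (by
          rw [← hassoc, hlen1]
          intro m hm
          by_cases hmi : m = pre.length + 1
          · subst hmi; omega
          · exact hmin m (by omega))
        (by
          rw [← hassoc, hlen1]
          intro s' hs'
          obtain ⟨m, hm1, hm2, hm3⟩ := hfail s' hs'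
          exact ⟨m, hm1, by omega, hm3⟩)
      rw [← hassoc] at h1 h2 h3
      refine ⟨s2, ?_, h1, h2, h3⟩
      simpa [hlen1] using hres

-- specialisation of pvGas to the whole list (empty prefix)
theorem pvGas0 (D : List Int) :
    ∃ s2 : Nat,
      ((PySem.List.enumerate D 0).foldl
        (fun (st : Int × Int) (p : Int × Int) =>
          let tank := st.2 + p.2
          if tank < 0 then (p.1 + 1, 0) else (st.1, tank)) (0, 0)).1 = (s2 : Int) ∧
      s2 ≤ D.length ∧
      (∀ m : Nat, m ≤ D.length → pvP D s2 ≤ pvP D m) ∧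
      (∀ s' : Nat, s' < s2 → ∃ m : Nat, s' < m ∧ m ≤ D.length ∧ pvP D m < pvP D s') := by
  obtain ⟨s2, hres, h1, h2, h3⟩ := pvGas D [] 0 0 (by simp) (by simp) 
    (by intro m hm; simp at hm; subst hm; simp) (by intro s' hs'; omega)
  simp only [List.nil_append, List.length_nil, Nat.cast_zero] at hres h1 h2 h3
  exact ⟨s2, hres, h1, h2, h3⟩

-- ===== VERDICT (by name: the statement is the Claim_ definition above) =====
theorem validStartingCity_spec : Claim_equal_validStartingCity := by
  intro distances fuel mpg _ hpre
  unfold Pre_validStartingCity at hpre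
  unfold Spec_validStartingCity
  rcases eq_or_ne distances.length 0 with h0 | h0
  · have hdist : distances = [] := List.length_eq_zero_iff.mp h0
    subst hdist
    simp [validStartingCity, validStartingCity_alt, pvA_loop,
      PySem.List.pyRange_one_eq_nil]
  · set n := distances.length with hn
    set D := List.zipWith (fun d f => f * mpg - d) distances fuel with hD
    have hDlen : D.length = n := by simp [hD, hn]; omega
    have hDne : D ≠ [] := by
      intro h; rw [h] at hDlen; simp at hDlen; omega
    have hPn : pvP D n = D.sum := by
      unfold pvP; rw [List.take_of_length_le (by omega)]
    have hP0 : pvP D 0 = 0 := rfl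
    have hiff : ∀ s : Nat, s < n → (0 ≤ pvA_inner distances fuel mpg n s ↔ pvValid D s) :=
      fun s hs => pvInner_iff distances fuel mpg s hpre hs
    have hvalidT : ∀ s : Nat, s < n → pvValid D s → 0 ≤ D.sum := by
      rintro s hs ⟨hA, hB⟩
      by_cases hs0 : s = 0
      · subst hs0
        have := hA n (by omega) (by omega)
        omega
      · have := hB s (by omega) le_rfl
        omega
    simp only [validStartingCity, validStartingCity_alt, ← hD, ← hn]
    by_cases hT : D.sum < 0
    · rw [if_pos (Or.inr hT)]
      apply pvLoop_none distances fuel mpg n n 0 n (by omega)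
      intro x hx1 hx2
      have hx : x = ((x.toNat : Nat) : Int) := by omega
      rw [ge_iff_le, hx]
      rw [hiff x.toNat (by omega)]
      intro hv
      exact absurd (hvalidT x.toNat (by omega) hv) (by omega)
    · rw [if_neg (by
        rintro (h | h)
        · exact hDne h
        · omega)]
      obtain ⟨s2, hres, hle, hmin, hfail⟩ := pvGas0 D
      rw [hDlen] at hle hmin hfail
      have hs2n : s2 < n := by
        by_contra hcon
        have hs2 : s2 = n := by omega
        obtain ⟨m, hm1, hm2, hm3⟩ := hfail 0 (by omega)
        have := hmin m hm2
        rw [hs2, hPn] at this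
        omega
      have hvalid : pvValid D s2 := by
        constructor
        · intro m _ hm2
          exact hmin m (by omega)
        · intro j _ hj2
          have := hmin j (by omega)
          omega
      have hnotvalid : ∀ k : Nat, k < s2 → ¬ pvValid D k := by
        rintro k hk ⟨hA, _⟩
        obtain ⟨m, hm1, hm2, hm3⟩ := hfail k hk
        have := hA m hm1 (by omega)
        omega
      rw [hres]
      apply pvLoop_first distances fuel mpg n s2 0 n s2 (by omega) (by omega)
        (by exact_mod_cast Int.ofNat_lt.mpr hs2n)
        ((hiff s2 hs2n).mpr hvalid)
      intro x hx1 hx2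
      have hx : x = ((x.toNat : Nat) : Int) := by omega
      rw [ge_iff_le, hx, hiff x.toNat (by omega)]
      exact hnotvalid x.toNat (by omega)
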